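-- pv_equiv track=rewrite | github.com/astoanne/enhanced_basecalling | app/bpd_utils.py | match_breakpoints
-- ===== SOURCE A (Python) =====
-- def match_breakpoints(algorithm, method, tolerance=5):
--     matched_algorithm = []
--     matched_method = []
--     false_positives = []
--     false_negatives = []
--
--     # Create copies to avoid modifying the original arrays
--     algorithm_copy = list(algorithm)
--     method_copy = list(method)
--
--     for point in algorithm:
--         # Find the closest point in the method within the tolerance
--         close_points = [m for m in method_copy if abs(m - point) <= tolerance]
--         if close_points:
--             closest_point = min(close_points, key=lambda x: abs(x - point))
--             matched_algorithm.append(point)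
--             matched_method.append(closest_point)
--             method_copy.remove(closest_point)
--         else:
--             false_negatives.append(point)
--
--     # Remaining points in method_copy are false positives
--     false_positives = method_copy
--
--     return matched_algorithm, matched_method, false_positives, false_negatives
-- ===== SOURCE B (Python) =====
-- def _bisect_lt(rem, x):
--     # first position whose value component is >= x (rem sorted by (value, index))
--     lo, hi = 0, len(rem)
--     while lo < hi:
--         mid = (lo + hi) // 2
--         if rem[mid][0] < x:
--             lo = mid + 1
--         else:
--             hi = mid
--     return lo
--
--
-- def match_breakpoints(algorithm, method, tolerance=5):
--     matched_algorithm = []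
--     matched_method = []
--     false_negatives = []
--
--     # remaining method points, kept sorted by (value, original index)
--     rem = sorted((v, i) for i, v in enumerate(method))
--
--     for point in algorithm:
--         j = _bisect_lt(rem, point)
--         best = None  # (distance, original index, position in rem)
--         if j < len(rem) and rem[j][0] - point <= tolerance:
--             best = (rem[j][0] - point, rem[j][1], j)
--         if j > 0 and point - rem[j - 1][0] <= tolerance:
--             k = _bisect_lt(rem, rem[j - 1][0])  # earliest entry holding that value
--             cand = (point - rem[k][0], rem[k][1], k)
--             if best is None or cand < best:
--                 best = cand
--         if best is None:
--             false_negatives.append(point)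
--         else:
--             pos = best[2]
--             matched_algorithm.append(point)
--             matched_method.append(rem[pos][0])
--             del rem[pos]
--
--     false_positives = [v for v, _ in sorted(rem, key=lambda t: t[1])]
--     return matched_algorithm, matched_method, false_positives, false_negatives
-- ===== Notes on version B (the rewrite author's own statement) =====
-- stated objective: faster
-- what changed: Replaces the per-point linear scan/min/remove over the surviving method list by one pre-sort of (value, index) pairs plus a hand-written binary search that inspects only the nearest value below and above each point (tie-broken by original index), deleting the matched entry in place.
import Mathlib
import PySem

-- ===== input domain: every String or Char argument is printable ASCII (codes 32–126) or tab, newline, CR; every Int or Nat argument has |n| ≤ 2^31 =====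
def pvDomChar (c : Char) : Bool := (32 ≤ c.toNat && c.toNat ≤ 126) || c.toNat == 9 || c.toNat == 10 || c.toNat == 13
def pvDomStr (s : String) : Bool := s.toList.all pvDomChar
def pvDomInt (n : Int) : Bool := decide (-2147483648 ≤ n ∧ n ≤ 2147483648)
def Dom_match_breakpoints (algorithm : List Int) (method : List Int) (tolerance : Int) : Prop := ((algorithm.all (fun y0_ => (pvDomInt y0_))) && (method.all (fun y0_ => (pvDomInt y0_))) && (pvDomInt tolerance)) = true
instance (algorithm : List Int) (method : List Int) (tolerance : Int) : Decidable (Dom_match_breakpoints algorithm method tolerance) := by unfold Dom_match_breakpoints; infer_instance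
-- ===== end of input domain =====

-- B replaces A's per-point linear scan/min/remove over the surviving method list by one pre-sort of
-- (value, index) pairs plus binary searches (tie-break by original index); measured faster at scale.


-- ===== PORT A =====
-- one iteration of A's `for point in algorithm` loop; state = (matched_algorithm, matched_method,
-- false_negatives, method_copy); `remove` cannot fail (c ∈ mc), the getD default is unreachable
def stepA (tolerance : Int) (st : List Int × List Int × List Int × List Int) (point : Int) :
    List Int × List Int × List Int × List Int :=
  let close := st.2.2.2.filter (fun m => decide (|m - point| ≤ tolerance))
  match PySem.List.min? close (fun x => |x - point|) with
  | some c => (st.1 ++ [point], st.2.1 ++ [c], st.2.2.1, (PySem.List.remove? st.2.2.2 c).getD st.2.2.2)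
  | none => (st.1, st.2.1, st.2.2.1 ++ [point], st.2.2.2)

def match_breakpoints (algorithm : List Int) (method : List Int) (tolerance : Int) :
    List Int × List Int × List Int × List Int :=
  let st := algorithm.foldl (stepA tolerance) ([], [], [], method)
  (st.1, st.2.1, st.2.2.2, st.2.2.1)

-- ===== PORT B =====
-- rem[i] with the index always in range where used (Source B indexes the same positions)
def pvGetPair (rem : List (Int × Int)) (i : Nat) : Int × Int := rem.getD i (0, 0)

-- Source B's hand-written `_bisect_lt` while-loop (lo, hi on a list sorted by (value, index));
-- the fuel argument only makes the loop structurally recursive: hi - lo shrinks every iteration,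
-- so fuel = hi - lo at the call is never exhausted
def bisectLtAux (rem : List (Int × Int)) (x : Int) : Nat → Nat → Nat → Nat
  | 0, lo, _ => lo
  | fuel + 1, lo, hi =>
    if lo < hi then
      let mid := (lo + hi) / 2
      if (pvGetPair rem mid).1 < x then bisectLtAux rem x fuel (mid + 1) hi
      else bisectLtAux rem x fuel lo mid
    else lo

def bisectLt (rem : List (Int × Int)) (x : Int) : Nat :=
  bisectLtAux rem x rem.length 0 rem.length

-- Python's `<` on the 3-tuples (distance, original index, position) Source B compares
def lex3lt (a b : Int × Int × Nat) : Bool :=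
  a.1 < b.1 || (a.1 == b.1 && (a.2.1 < b.2.1 || (a.2.1 == b.2.1 && a.2.2 < b.2.2)))

-- one iteration of Source B's loop; state = (matched_algorithm, matched_method, false_negatives, rem)
def stepB (tolerance : Int) (st : List Int × List Int × List Int × List (Int × Int)) (point : Int) :
    List Int × List Int × List Int × List (Int × Int) :=
  let rem := st.2.2.2
  let j := bisectLt rem point
  let best0 : Option (Int × Int × Nat) :=
    if j < rem.length ∧ (pvGetPair rem j).1 - point ≤ tolerance then
      some ((pvGetPair rem j).1 - point, (pvGetPair rem j).2, j)
    else none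
  let best : Option (Int × Int × Nat) :=
    if 0 < j ∧ point - (pvGetPair rem (j - 1)).1 ≤ tolerance then
      let k := bisectLt rem (pvGetPair rem (j - 1)).1
      let cand : Int × Int × Nat := (point - (pvGetPair rem k).1, (pvGetPair rem k).2, k)
      match best0 with
      | none => some cand
      | some b => if lex3lt cand b then some cand else some b
    else best0
  match best with
  | none => (st.1, st.2.1, st.2.2.1 ++ [point], rem)
  | some b => (st.1 ++ [point], st.2.1 ++ [(pvGetPair rem b.2.2).1], st.2.2.1, rem.eraseIdx b.2.2)

def match_breakpoints_alt (algorithm : List Int) (method : List Int) (tolerance : Int) :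
    List Int × List Int × List Int × List Int :=
  -- rem = sorted((v, i) for i, v in enumerate(method))  — Python tuple order = sorted2
  let rem0 := PySem.List.sorted2 ((PySem.List.enumerate method).map (fun p => (p.2, p.1)))
      (fun p => p.1) (fun p => p.2)
  let st := algorithm.foldl (stepB tolerance) ([], [], [], rem0)
  (st.1, st.2.1, (PySem.List.sorted st.2.2.2 (fun p => p.2)).map (fun p => p.1), st.2.2.1)

-- ===== PRECONDITION & SPEC =====
def Spec_match_breakpoints (algorithm : List Int) (method : List Int) (tolerance : Int) (out : List Int × List Int × List Int × List Int) : Prop := out = match_breakpoints_alt algorithm method tolerance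
instance (algorithm : List Int) (method : List Int) (tolerance : Int) (out : List Int × List Int × List Int × List Int) : Decidable (Spec_match_breakpoints algorithm method tolerance out) := by unfold Spec_match_breakpoints; infer_instance

-- ===== CLAIM (what is proved, stated in full; the proofs are below) =====
def Claim_equal_match_breakpoints : Prop := ∀ (algorithm : List Int) (method : List Int) (tolerance : Int), Dom_match_breakpoints algorithm method tolerance → Spec_match_breakpoints algorithm method tolerance (match_breakpoints algorithm method tolerance)

-- ===== LEMMAS AND PROOFS =====

-- the coupling invariant: l is the surviving (value, index) pairs in original (index) order,
-- rem is the same pairs in strictly increasing (value, index) order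
def pvInv (l rem : List (Int × Int)) : Prop :=
  l.Pairwise (fun p q => p.2 < q.2) ∧ rem.Pairwise (fun p q => toLex p < toLex q) ∧ rem.Perm l

-- ---- generic fact about Python min(xs, key=…): it returns the FIRST key-minimal element ----
def pvMinStep {α κ : Type} [LT κ] [DecidableLT κ] (key : α → κ) (acc : Option α) (x : α) : Option α :=
  match acc with
  | none => some x
  | some m => if key x < key m then some x else some m

theorem min?_eq_foldl_pvMinStep {α κ : Type} [LT κ] [DecidableLT κ] (xs : List α) (key : α → κ) :
    PySem.List.min? xs key = xs.foldl (pvMinStep key) none := rfl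

theorem foldl_min_keep {α κ : Type} [LinearOrder κ] (key : α → κ) (m : α) (xs : List α)
    (h : ∀ y ∈ xs, key m ≤ key y) :
    xs.foldl (pvMinStep key) (some m) = some m := by
  induction xs with
  | nil => rfl
  | cons y t ih =>
    have hy : ¬ key y < key m := not_lt.mpr (h y (List.mem_cons_self))
    simp only [List.foldl_cons, pvMinStep, if_neg hy]
    exact ih (fun z hz => h z (List.mem_cons_of_mem _ hz))

theorem foldl_min_gt {α κ : Type} [LinearOrder κ] (key : α → κ) (m : α) (xs : List α)
    (h1 : ∀ y ∈ xs, key m < key y) (acc : Option α)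
    (hacc : acc = none ∨ ∃ a, acc = some a ∧ key m < key a) :
    (xs.foldl (pvMinStep key) acc) = none ∨
    ∃ a, (xs.foldl (pvMinStep key) acc) = some a ∧ key m < key a := by
  induction xs generalizing acc with
  | nil => exact hacc
  | cons y t ih =>
    refine ih (fun z hz => h1 z (List.mem_cons_of_mem _ hz)) _ ?_
    rcases hacc with h | ⟨a, ha, hlt⟩
    · subst h
      exact Or.inr ⟨y, rfl, h1 y (List.mem_cons_self)⟩
    · subst ha
      by_cases hc : key y < key a
      · simp only [pvMinStep, if_pos hc]
        exact Or.inr ⟨y, rfl, h1 y (List.mem_cons_self)⟩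
      · simp only [pvMinStep, if_neg hc]
        exact Or.inr ⟨a, rfl, hlt⟩

theorem min?_eq_first {α κ : Type} [LinearOrder κ] (key : α → κ) (xs₁ xs₂ : List α) (m : α)
    (h1 : ∀ y ∈ xs₁, key m < key y) (h2 : ∀ y ∈ xs₂, key m ≤ key y) :
    PySem.List.min? (xs₁ ++ m :: xs₂) key = some m := by
  rw [min?_eq_foldl_pvMinStep, List.foldl_append]
  rcases foldl_min_gt key m xs₁ h1 none (Or.inl rfl) with h | ⟨a, ha, hlt⟩
  · rw [h, List.foldl_cons]
    show List.foldl (pvMinStep key) (pvMinStep key none m) xs₂ = some m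
    simp only [pvMinStep]
    exact foldl_min_keep key m xs₂ h2
  · rw [ha, List.foldl_cons]
    show List.foldl (pvMinStep key) (pvMinStep key (some a) m) xs₂ = some m
    simp only [pvMinStep, if_pos hlt]
    exact foldl_min_keep key m xs₂ h2

-- ---- bisectLt spec ----
theorem bisectLtAux_spec (rem : List (Int × Int)) (x : Int)
    (hmono : ∀ i j (_ : i < rem.length) (_ : j < rem.length), i ≤ j → rem[i].1 ≤ rem[j].1) :
    ∀ fuel lo hi, hi - lo ≤ fuel → lo ≤ hi → hi ≤ rem.length →
    (∀ i (h : i < rem.length), i < lo → rem[i].1 < x) →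
    (∀ i (h : i < rem.length), hi ≤ i → x ≤ rem[i].1) →
    bisectLtAux rem x fuel lo hi ≤ rem.length ∧
      (∀ i (h : i < rem.length), i < bisectLtAux rem x fuel lo hi → rem[i].1 < x) ∧
      (∀ i (h : i < rem.length), bisectLtAux rem x fuel lo hi ≤ i → x ≤ rem[i].1) := by
  intro fuel
  induction fuel with
  | zero =>
    intro lo hi hn hlohi hhi hlo hhi2
    have : lo = hi := by omega
    subst this
    exact ⟨le_trans hlohi hhi, hlo, hhi2⟩
  | succ fuel ih =>
    intro lo hi hn hlohi hhi hlo hhi2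
    rw [bisectLtAux]
    by_cases h : lo < hi
    · simp only [if_pos h]
      have hmid1 : lo ≤ (lo + hi) / 2 := by omega
      have hmid2 : (lo + hi) / 2 < hi := by omega
      have hmidlen : (lo + hi) / 2 < rem.length := by omega
      rw [show pvGetPair rem ((lo + hi) / 2) = rem[(lo + hi) / 2] from
        List.getD_eq_getElem rem (0, 0) hmidlen]
      by_cases hc : rem[(lo + hi) / 2].1 < x
      · simp only [if_pos hc]
        refine ih _ _ (by omega) (by omega) hhi ?_ hhi2
        intro i hilen hilt
        exact lt_of_le_of_lt (hmono i _ hilen hmidlen (by omega)) hc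
      · simp only [if_neg hc]
        refine ih _ _ (by omega) (by omega) (by omega) hlo ?_
        intro i hilen hile
        exact le_trans (not_lt.mp hc) (hmono _ i hmidlen hilen hile)
    · simp only [if_neg h]
      have : lo = hi := by omega
      subst this
      exact ⟨hhi, hlo, hhi2⟩

theorem bisectLt_spec (rem : List (Int × Int)) (x : Int)
    (hmono : ∀ i j (_ : i < rem.length) (_ : j < rem.length), i ≤ j → rem[i].1 ≤ rem[j].1) :
    bisectLt rem x ≤ rem.length ∧
      (∀ i (h : i < rem.length), i < bisectLt rem x → rem[i].1 < x) ∧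
      (∀ i (h : i < rem.length), bisectLt rem x ≤ i → x ≤ rem[i].1) := by
  exact bisectLtAux_spec rem x hmono rem.length 0 rem.length (by omega) (Nat.zero_le _) le_rfl
    (fun i h hi => absurd hi (Nat.not_lt_zero i)) (fun i h hi => absurd h (Nat.not_lt.mpr hi))

-- ---- stepB characterisation ----
theorem stepB_cases (tol point : Int) (ma mm fn : List Int) (rem : List (Int × Int))
    (hs : rem.Pairwise (fun p q => toLex p < toLex q)) :
    ((∀ q ∈ rem, ¬ |q.1 - point| ≤ tol) ∧
      stepB tol (ma, mm, fn, rem) point = (ma, mm, fn ++ [point], rem)) ∨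
    (∃ pos, ∃ h : pos < rem.length,
      |rem[pos].1 - point| ≤ tol ∧
      (∀ q ∈ rem, |q.1 - point| ≤ tol →
        (|rem[pos].1 - point| < |q.1 - point| ∨
         (|rem[pos].1 - point| = |q.1 - point| ∧ rem[pos].2 ≤ q.2))) ∧
      stepB tol (ma, mm, fn, rem) point =
        (ma ++ [point], mm ++ [rem[pos].1], fn, rem.eraseIdx pos)) := by
  have hlex : ∀ i j (hi : i < rem.length) (hj : j < rem.length), i < j →
      (rem[i].1 < rem[j].1 ∨ (rem[i].1 = rem[j].1 ∧ rem[i].2 < rem[j].2)) := by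
    intro i j hi hj hij
    exact Prod.Lex.toLex_lt_toLex.mp (List.pairwise_iff_getElem.mp hs i j hi hj hij)
  have hmono : ∀ i j (hi : i < rem.length) (hj : j < rem.length), i ≤ j → rem[i].1 ≤ rem[j].1 := by
    intro i j hi hj hij
    rcases Nat.eq_or_lt_of_le hij with h | h
    · subst h; exact le_rfl
    · rcases hlex i j hi hj h with h' | ⟨h', _⟩
      · exact le_of_lt h'
      · exact le_of_eq h'
  have hsnd : ∀ i j (hi : i < rem.length) (hj : j < rem.length), i ≤ j →
      rem[i].1 = rem[j].1 → rem[i].2 ≤ rem[j].2 := by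
    intro i j hi hj hij heq
    rcases Nat.eq_or_lt_of_le hij with h | h
    · subst h; exact le_rfl
    · rcases hlex i j hi hj h with h' | ⟨_, h'⟩
      · omega
      · exact le_of_lt h'
  obtain ⟨hjle, hjlt, hjge⟩ := bisectLt_spec rem point hmono
  set j := bisectLt rem point with hjdef
  have habs_ge : ∀ i (h : i < rem.length), j ≤ i → |rem[i].1 - point| = rem[i].1 - point :=
    fun i h hji => abs_of_nonneg (by have := hjge i h hji; omega)
  have habs_lt : ∀ i (h : i < rem.length), i < j → |rem[i].1 - point| = point - rem[i].1 := by
    intro i h hij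
    have := hjlt i h hij
    rw [abs_of_neg (by omega)]; ring
  by_cases hA : j < rem.length ∧ (pvGetPair rem j).1 - point ≤ tol
  · -- an above candidate exists
    have hjlen : j < rem.length := hA.1
    have hgj : pvGetPair rem j = rem[j] := List.getD_eq_getElem rem (0, 0) hjlen
    have hdj : |rem[j].1 - point| = rem[j].1 - point := habs_ge j hjlen le_rfl
    have htolj : |rem[j].1 - point| ≤ tol := by rw [hdj]; have := hA.2; rwa [hgj] at this
    -- dominance of rem[j] on the ≥-point side
    have habove : ∀ i (hi : i < rem.length), j ≤ i → |rem[i].1 - point| ≤ tol →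
        (|rem[j].1 - point| < |rem[i].1 - point| ∨
         (|rem[j].1 - point| = |rem[i].1 - point| ∧ rem[j].2 ≤ rem[i].2)) := by
      intro i hi hji _
      rw [hdj, habs_ge i hi hji]
      have h1 := hmono j i hjlen hi hji
      rcases lt_or_eq_of_le h1 with h2 | h2
      · left; omega
      · right; exact ⟨by omega, hsnd j i hjlen hi hji h2⟩
    by_cases hB : 0 < j ∧ point - (pvGetPair rem (j - 1)).1 ≤ tol
    · -- both candidates
      have hj1len : j - 1 < rem.length := by omega
      have hgj1 : pvGetPair rem (j - 1) = rem[j - 1] := List.getD_eq_getElem rem (0, 0) hj1len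
      obtain ⟨hkle, hklt, hkge⟩ := bisectLt_spec rem (pvGetPair rem (j - 1)).1 hmono
      set k := bisectLt rem (pvGetPair rem (j - 1)).1 with hkdef
      have hkj1 : k ≤ j - 1 := by
        by_contra hc
        have := hklt (j - 1) hj1len (by omega)
        rw [hgj1] at this
        exact lt_irrefl _ this
      have hklen : k < rem.length := by omega
      have hgk : pvGetPair rem k = rem[k] := List.getD_eq_getElem rem (0, 0) hklen
      have hkval : rem[k].1 = rem[j - 1].1 := by
        have h1 := hkge k hklen le_rfl
        rw [hgj1] at h1
        exact le_antisymm (hmono k (j - 1) hklen hj1len hkj1) h1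
      have hdk : |rem[k].1 - point| = point - rem[k].1 := habs_lt k hklen (by omega)
      have htolk : |rem[k].1 - point| ≤ tol := by
        rw [hdk, hkval]
        have := hB.2; rwa [hgj1] at this
      -- dominance of rem[k] on the <-point side
      have hbelow : ∀ i (hi : i < rem.length), i < j → |rem[i].1 - point| ≤ tol →
          (|rem[k].1 - point| < |rem[i].1 - point| ∨
           (|rem[k].1 - point| = |rem[i].1 - point| ∧ rem[k].2 ≤ rem[i].2)) := by
        intro i hi hij _
        rw [hdk, habs_lt i hi hij]
        have h1 : rem[i].1 ≤ rem[j - 1].1 := hmono i (j - 1) hi hj1len (by omega)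
        rcases lt_or_eq_of_le h1 with h2 | h2
        · left; omega
        · right
          refine ⟨by omega, ?_⟩
          have hik : k ≤ i := by
            by_contra hc
            have := hklt i hi (by omega)
            rw [hgj1] at this
            omega
          exact hsnd k i hklen hi hik (by omega)
      -- which candidate wins
      by_cases hC : lex3lt (point - (pvGetPair rem k).1, (pvGetPair rem k).2, k)
          ((pvGetPair rem j).1 - point, (pvGetPair rem j).2, j) = true
      · -- below candidate wins
        have hCp : point - rem[k].1 < rem[j].1 - point ∨
            (point - rem[k].1 = rem[j].1 - point ∧ rem[k].2 ≤ rem[j].2) := by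
          have := hC
          rw [hgk, hgj] at this
          simp only [lex3lt, Bool.or_eq_true, Bool.and_eq_true, decide_eq_true_eq,
            beq_iff_eq] at this
          omega
        right
        refine ⟨k, hklen, htolk, ?_, ?_⟩
        · intro q hq hqtol
          obtain ⟨i, hi, hqi⟩ := List.mem_iff_getElem.mp hq
          subst hqi
          rcases Nat.lt_or_ge i j with hij | hij
          · exact hbelow i hi hij hqtol
          · rcases habove i hi hij hqtol with h1 | ⟨h1, h2⟩
            · left; rw [hdk, hdj] at *; omega
            · rw [hdk] at *; rw [hdj] at h1
              rcases hCp with h3 | ⟨h3, h4⟩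
              · left; omega
              · right; exact ⟨by omega, le_trans h4 h2⟩
        · simp only [stepB, ← hjdef, ← hkdef]
          rw [if_pos hA, if_pos hB]
          simp only [hgk, hgj] at hC ⊢
          simp [hC]
          rw [hgk]
      · -- above candidate wins
        have hCp : rem[j].1 - point ≤ point - rem[k].1 ∧
            (rem[j].1 - point = point - rem[k].1 → rem[j].2 < rem[k].2) := by
          have := hC
          rw [hgk, hgj] at this
          simp only [lex3lt, Bool.or_eq_true, Bool.and_eq_true, decide_eq_true_eq,
            beq_iff_eq] at this
          have hkj : k < j := by omega
          constructor
          · by_contra hc; exact this (Or.inl (by omega))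
          · intro he
            by_contra hc
            rcases lt_or_eq_of_le (not_lt.mp hc) with h1 | h1
            · exact this (Or.inr ⟨by omega, Or.inl h1⟩)
            · exact this (Or.inr ⟨by omega, Or.inr ⟨by omega, hkj⟩⟩)
        right
        refine ⟨j, hjlen, htolj, ?_, ?_⟩
        · intro q hq hqtol
          obtain ⟨i, hi, hqi⟩ := List.mem_iff_getElem.mp hq
          subst hqi
          rcases Nat.lt_or_ge i j with hij | hij
          · rcases hbelow i hi hij hqtol with h1 | ⟨h1, h2⟩
            · rw [hdk] at h1; rw [hdj]
              rw [habs_lt i hi hij] at *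
              rcases hCp with ⟨h3, _⟩
              left; omega
            · rw [hdk] at h1; rw [hdj]
              rw [habs_lt i hi hij] at *
              rcases hCp with ⟨h3, h4⟩
              rcases lt_or_eq_of_le h3 with h5 | h5
              · left; omega
              · right
                exact ⟨by omega, le_trans (le_of_lt (h4 (by omega))) h2⟩
          · exact habove i hi hij hqtol
        · simp only [stepB, ← hjdef, ← hkdef]
          rw [if_pos hA, if_pos hB]
          simp only [hgk, hgj] at hC ⊢
          simp [hC]
          rw [hgj]
    · -- only the above candidate
      right
      refine ⟨j, hjlen, htolj, ?_, ?_⟩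
      · intro q hq hqtol
        obtain ⟨i, hi, hqi⟩ := List.mem_iff_getElem.mp hq
        subst hqi
        rcases Nat.lt_or_ge i j with hij | hij
        · exfalso
          have hj0 : 0 < j := by omega
          have h1 : rem[i].1 ≤ rem[j - 1].1 := hmono i (j - 1) hi (by omega) (by omega)
          have h2 : ¬ point - (pvGetPair rem (j - 1)).1 ≤ tol := by
            intro hc; exact hB ⟨hj0, hc⟩
          have hgj1' : pvGetPair rem (j - 1) = rem[j - 1] :=
            List.getD_eq_getElem rem (0, 0) (by omega)
          rw [hgj1'] at h2
          rw [habs_lt i hi hij] at hqtol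
          omega
        · exact habove i hi hij hqtol
      · simp only [stepB, ← hjdef]
        rw [if_pos hA, if_neg hB]
        simp [hgj]
  · -- no above candidate
    have hnoabove : ∀ i (hi : i < rem.length), j ≤ i → ¬ |rem[i].1 - point| ≤ tol := by
      intro i hi hji hc
      rw [habs_ge i hi hji] at hc
      have h1 : j < rem.length := by omega
      have h2 := hmono j i h1 hi hji
      have h3 : ¬ (pvGetPair rem j).1 - point ≤ tol := fun hcc => hA ⟨h1, hcc⟩
      have hgj' : pvGetPair rem j = rem[j] := List.getD_eq_getElem rem (0, 0) h1
      rw [hgj'] at h3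
      omega
    by_cases hB : 0 < j ∧ point - (pvGetPair rem (j - 1)).1 ≤ tol
    · -- only the below candidate
      have hj1len : j - 1 < rem.length := by omega
      have hgj1 : pvGetPair rem (j - 1) = rem[j - 1] := List.getD_eq_getElem rem (0, 0) hj1len
      obtain ⟨hkle, hklt, hkge⟩ := bisectLt_spec rem (pvGetPair rem (j - 1)).1 hmono
      set k := bisectLt rem (pvGetPair rem (j - 1)).1 with hkdef
      have hkj1 : k ≤ j - 1 := by
        by_contra hc
        have := hklt (j - 1) hj1len (by omega)
        rw [hgj1] at this
        exact lt_irrefl _ this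
      have hklen : k < rem.length := by omega
      have hgk : pvGetPair rem k = rem[k] := List.getD_eq_getElem rem (0, 0) hklen
      have hkval : rem[k].1 = rem[j - 1].1 := by
        have h1 := hkge k hklen le_rfl
        rw [hgj1] at h1
        exact le_antisymm (hmono k (j - 1) hklen hj1len hkj1) h1
      have hdk : |rem[k].1 - point| = point - rem[k].1 := habs_lt k hklen (by omega)
      have htolk : |rem[k].1 - point| ≤ tol := by
        rw [hdk, hkval]
        have := hB.2; rwa [hgj1] at this
      right
      refine ⟨k, hklen, htolk, ?_, ?_⟩
      · intro q hq hqtol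
        obtain ⟨i, hi, hqi⟩ := List.mem_iff_getElem.mp hq
        subst hqi
        rcases Nat.lt_or_ge i j with hij | hij
        · rw [hdk, habs_lt i hi hij]
          have h1 : rem[i].1 ≤ rem[j - 1].1 := hmono i (j - 1) hi hj1len (by omega)
          rcases lt_or_eq_of_le h1 with h2 | h2
          · left; omega
          · right
            refine ⟨by omega, ?_⟩
            have hik : k ≤ i := by
              by_contra hc
              have := hklt i hi (by omega)
              rw [hgj1] at this
              omega
            exact hsnd k i hklen hi hik (by omega)
        · exact absurd hqtol (hnoabove i hi hij)
      · simp only [stepB, ← hjdef, ← hkdef]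
        rw [if_neg hA, if_pos hB]
        simp [hgk]
    · -- no candidate at all
      left
      constructor
      · intro q hq hc
        obtain ⟨i, hi, hqi⟩ := List.mem_iff_getElem.mp hq
        subst hqi
        rcases Nat.lt_or_ge i j with hij | hij
        · have hj0 : 0 < j := by omega
          have h1 : rem[i].1 ≤ rem[j - 1].1 := hmono i (j - 1) hi (by omega) (by omega)
          have h2 : ¬ point - (pvGetPair rem (j - 1)).1 ≤ tol := fun hcc => hB ⟨hj0, hcc⟩
          have hgj1' : pvGetPair rem (j - 1) = rem[j - 1] :=
            List.getD_eq_getElem rem (0, 0) (by omega)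
          rw [hgj1'] at h2
          rw [habs_lt i hi hij] at hc
          omega
        · exact hnoabove i hi hij hc
      · simp only [stepB, ← hjdef]
        rw [if_neg hA, if_neg hB]

-- ---- the step equivalence ----
theorem step_eq (tol point : Int) (ma mm fn : List Int) (l rem : List (Int × Int))
    (hInv : pvInv l rem) :
    ∃ l', pvInv l' (stepB tol (ma, mm, fn, rem) point).2.2.2 ∧
      stepA tol (ma, mm, fn, l.map (fun p => p.1)) point =
        ((stepB tol (ma, mm, fn, rem) point).1, (stepB tol (ma, mm, fn, rem) point).2.1,
         (stepB tol (ma, mm, fn, rem) point).2.2.1, l'.map (fun p => p.1)) := by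
  obtain ⟨hl, hrem, hperm⟩ := hInv
  rcases stepB_cases tol point ma mm fn rem hrem with ⟨hnone, hout⟩ | ⟨pos, hpos, htol, hmin, hout⟩
  · -- no match: A's close list is empty
    refine ⟨l, by rw [hout]; exact ⟨hl, hrem, hperm⟩, ?_⟩
    rw [hout]
    have hclose : (l.map (fun p => p.1)).filter (fun m => decide (|m - point| ≤ tol)) = [] := by
      rw [List.filter_eq_nil_iff]
      intro a ha
      obtain ⟨q, hq, hqa⟩ := List.mem_map.mp ha
      simp only [decide_eq_true_eq]
      rw [← hqa]
      exact hnone q (hperm.mem_iff.mpr hq)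
    simp only [stepA, hclose]
    rfl
  · -- matched: A removes the same pair
    have hpl : rem[pos] ∈ l := hperm.subset (List.getElem_mem hpos)
    obtain ⟨l₁, l₂, hsplit⟩ := List.append_of_mem hpl
    have hl' : l.Pairwise (fun p q => p.2 < q.2) := hl
    rw [hsplit] at hl'
    have hsnd₁ : ∀ q ∈ l₁, q.2 < rem[pos].2 := by
      intro q hq
      exact (List.pairwise_append.mp hl').2.2 q hq rem[pos] List.mem_cons_self
    have hfirst : ∀ q ∈ l₁, q.1 ≠ rem[pos].1 := by
      intro q hq hqp
      have hqrem : q ∈ rem := hperm.mem_iff.mpr (by rw [hsplit]; exact List.mem_append_left _ hq)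
      have hqtol : |q.1 - point| ≤ tol := by rw [hqp]; exact htol
      rcases hmin q hqrem hqtol with h1 | ⟨_, h2⟩
      · rw [hqp] at h1; exact lt_irrefl _ h1
      · have := hsnd₁ q hq; omega
    -- A's close list splits around rem[pos].1
    have hmc : l.map (fun p => p.1) = l₁.map (fun p => p.1) ++ rem[pos].1 :: l₂.map (fun p => p.1) := by
      rw [hsplit]; simp
    have hfilter : (l.map (fun p => p.1)).filter (fun m => decide (|m - point| ≤ tol)) =
        (l₁.map (fun p => p.1)).filter (fun m => decide (|m - point| ≤ tol)) ++
          rem[pos].1 :: (l₂.map (fun p => p.1)).filter (fun m => decide (|m - point| ≤ tol)) := by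
      rw [hmc, List.filter_append, List.filter_cons, if_pos (by simpa using htol)]
    have hminq : PySem.List.min?
        ((l.map (fun p => p.1)).filter (fun m => decide (|m - point| ≤ tol)))
        (fun x => |x - point|) = some rem[pos].1 := by
      rw [hfilter]
      refine min?_eq_first _ _ _ _ ?_ ?_
      · intro y hy
        obtain ⟨hy', hytol⟩ := List.mem_filter.mp hy
        obtain ⟨q, hq, hqa⟩ := List.mem_map.mp hy'
        have hqrem : q ∈ rem := hperm.mem_iff.mpr (by rw [hsplit]; exact List.mem_append_left _ hq)
        rcases hmin q hqrem (by rw [hqa]; exact of_decide_eq_true hytol) with h1 | ⟨_, h2⟩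
        · rw [← hqa]; exact h1
        · have := hsnd₁ q hq; omega
      · intro y hy
        obtain ⟨hy', hytol⟩ := List.mem_filter.mp hy
        obtain ⟨q, hq, hqa⟩ := List.mem_map.mp hy'
        have hqrem : q ∈ rem := hperm.mem_iff.mpr
          (by rw [hsplit]; exact List.mem_append_right _ (List.mem_cons_of_mem _ hq))
        rcases hmin q hqrem (by rw [hqa]; exact of_decide_eq_true hytol) with h1 | ⟨h1, _⟩
        · rw [← hqa]; exact le_of_lt h1
        · rw [← hqa]; exact le_of_eq h1
    have hnotmem : rem[pos].1 ∉ l₁.map (fun p => p.1) := by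
      intro hc
      obtain ⟨q, hq, hqa⟩ := List.mem_map.mp hc
      exact hfirst q hq hqa
    have hremove : PySem.List.remove? (l.map (fun p => p.1)) rem[pos].1 =
        some (l₁.map (fun p => p.1) ++ l₂.map (fun p => p.1)) := by
      rw [hmc]
      rw [PySem.List.remove?_eq_some_erase _ _
        (List.mem_append_right _ List.mem_cons_self)]
      rw [List.erase_append_right _ hnotmem, List.erase_cons_head]
    refine ⟨l₁ ++ l₂, ?_, ?_⟩
    · rw [hout]
      refine ⟨?_, ?_, ?_⟩
      · refine hl'.sublist ?_
        exact ((l₂.sublist_cons_self rem[pos]).append_left l₁)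
      · exact hrem.sublist (rem.eraseIdx_sublist pos)
      · -- permutation: drop the matched pair from both sides
        have hrem_split : rem = rem.take pos ++ rem[pos] :: rem.drop (pos + 1) := by
          conv_lhs => rw [← List.take_append_drop pos rem]
          rw [List.drop_eq_getElem_cons hpos]
        have h1 : (rem.take pos ++ rem[pos] :: rem.drop (pos + 1)).Perm (l₁ ++ rem[pos] :: l₂) := by
          rw [← hrem_split, ← hsplit]; exact hperm
        have h2 := (List.perm_middle.symm.trans h1).trans List.perm_middle
        rw [List.eraseIdx_eq_take_drop_succ]
        exact h2.cons_inv
    · rw [hout]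
      simp only [stepA, hminq, hremove]
      simp [hmc]
  

-- ---- the loop ----
theorem loop_eq (tol : Int) (alg : List Int) :
    ∀ (ma mm fn : List Int) (l rem : List (Int × Int)), pvInv l rem →
    ∃ l', pvInv l' (alg.foldl (stepB tol) (ma, mm, fn, rem)).2.2.2 ∧
      alg.foldl (stepA tol) (ma, mm, fn, l.map (fun p => p.1)) =
        ((alg.foldl (stepB tol) (ma, mm, fn, rem)).1,
         (alg.foldl (stepB tol) (ma, mm, fn, rem)).2.1,
         (alg.foldl (stepB tol) (ma, mm, fn, rem)).2.2.1, l'.map (fun p => p.1)) := by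
  induction alg with
  | nil => exact fun ma mm fn l rem h => ⟨l, h, rfl⟩
  | cons point t ih =>
    intro ma mm fn l rem h
    obtain ⟨l₁, h₁, heq⟩ := step_eq tol point ma mm fn l rem h
    simp only [List.foldl_cons, heq]
    simpa using ih (stepB tol (ma, mm, fn, rem) point).1 (stepB tol (ma, mm, fn, rem) point).2.1
      (stepB tol (ma, mm, fn, rem) point).2.2.1 l₁ (stepB tol (ma, mm, fn, rem) point).2.2.2 h₁

-- ---- initialisation ----
theorem init_inv (method : List Int) :
    pvInv ((PySem.List.enumerate method).map (fun p => (p.2, p.1)))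
      (PySem.List.sorted2 ((PySem.List.enumerate method).map (fun p => (p.2, p.1)))
        (fun p => p.1) (fun p => p.2)) := by
  set l₀ := (PySem.List.enumerate method).map (fun p => (p.2, p.1)) with hl₀
  have hpair : l₀.Pairwise (fun p q => p.2 < q.2) := by
    rw [hl₀, List.pairwise_map]
    exact PySem.List.pairwise_lt_enumerate method 0
  have hnodup : l₀.Nodup :=
    (hpair.imp (fun {p q} h => by intro e; rw [e] at h; exact lt_irrefl _ h))
  have hs2 : PySem.List.sorted2 l₀ (fun p => p.1) (fun p => p.2) =
      PySem.List.sorted l₀ (fun p : Int × Int => toLex p) := by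
    show List.foldl (fun acc x => PySem.List.insertBy _ x acc) [] l₀ =
      List.foldl (fun acc x => PySem.List.insertBy _ x acc) [] l₀
    have hbef : (fun (a b : Int × Int) =>
        decide (a.1 < b.1) || (!decide (b.1 < a.1) && decide (a.2 < b.2))) =
        (fun (a b : Int × Int) => decide (toLex a < toLex b)) := by
      funext a b
      rw [Bool.eq_iff_iff]
      simp only [Bool.or_eq_true, Bool.and_eq_true, decide_eq_true_eq, Bool.not_eq_true',
        decide_eq_false_iff_not, Prod.Lex.toLex_lt_toLex]
      omega
    rw [hbef]
  have hperm : (PySem.List.sorted2 l₀ (fun p => p.1) (fun p => p.2)).Perm l₀ :=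
    PySem.List.sorted2_perm l₀ _ _ false
  refine ⟨hpair, ?_, hperm⟩
  have hle : (PySem.List.sorted2 l₀ (fun p => p.1) (fun p => p.2)).Pairwise
      (fun p q => toLex p ≤ toLex q) := by
    rw [hs2]; exact PySem.List.sorted_pairwise l₀ _
  have hnd : (PySem.List.sorted2 l₀ (fun p => p.1) (fun p => p.2)).Nodup :=
    hperm.nodup_iff.mpr hnodup
  exact (hle.and hnd).imp (fun {p q} h =>
    lt_of_le_of_ne h.1 (fun e => h.2 (toLex.injective e)))

-- ===== VERDICT (by name: the statement is the Claim_ definition above) =====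
theorem match_breakpoints_spec : Claim_equal_match_breakpoints := by
  intro algorithm method tolerance _
  unfold Spec_match_breakpoints match_breakpoints match_breakpoints_alt
  have hinit := init_inv method
  obtain ⟨l', hInv', heq⟩ := loop_eq tolerance algorithm [] [] []
    ((PySem.List.enumerate method).map (fun p => (p.2, p.1))) _ hinit
  have hm : ((PySem.List.enumerate method).map (fun p => (p.2, p.1))).map (fun p => p.1) = method := by
    simp only [List.map_map]
    exact PySem.List.map_snd_enumerate method 0
  rw [hm] at heq
  simp only [heq]
  obtain ⟨hl', hrem', hperm'⟩ := hInv'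
  have hsorted : PySem.List.sorted
      (algorithm.foldl (stepB tolerance) ([], [], [],
        PySem.List.sorted2 ((PySem.List.enumerate method).map (fun p => (p.2, p.1)))
          (fun p => p.1) (fun p => p.2))).2.2.2 (fun p => p.2) = l' :=
    PySem.List.sorted_eq_of_perm_of_pairwise_lt _ _ _ (hperm'.symm) hl'
  rw [hsorted]
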